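-- pv_equiv track=rewrite | github.com/suryanshnemaascentt/testing_tool_Avertex | modules/edit_estimate.py | scan_dom
-- ===== SOURCE A (Python) =====
-- def scan_dom(dom):
--     result = {
--         "email_input": None,
--         "password_input": None,
--         "next_btn": None,
--         "signin_btn": None,
--         "yes_btn": None,
--
--         "project_name": None,
--         "description_input": None,
--         "start_date": None,
--         "end_date": None,
--     }
--
--     for el in dom:
--         tag = (el.get("tag") or "").lower()
--         etype = (el.get("type") or "").lower()
--         text = (el.get("text") or "").lower()
--         eid = (el.get("id") or "").lower()
--         label = (el.get("label") or "").lower()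
--         placeholder = (el.get("placeholder") or "").lower()
--
--         comb = text + " " + label + " " + eid
--
--         # LOGIN
--         if etype == "email" or eid == "i0116":
--             result["email_input"] = el
--
--         if etype == "password" or eid == "i0118":
--             result["password_input"] = el
--
--         if "next" in comb:
--             result["next_btn"] = el
--
--         if "sign in" in comb:
--             result["signin_btn"] = el
--
--         if "yes" in comb:
--             result["yes_btn"] = el
--
--         # FORM
--         if "enter project name" in placeholder:
--             result["project_name"] = el
--
--         # Description field (NEW FIX)
--         if "brief project description" in placeholder:
--             result["description_input"] = el
--
--         # DATE FIELDS
--         if el.get("selector") == "(//input[@type=\"date\"])[1]":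
--             result["start_date"] = el
--
--         if el.get("selector") == "(//input[@type=\"date\"])[2]":
--             result["end_date"] = el
--
--     return result
-- ===== SOURCE B (Python) =====
-- def scan_dom(dom):
--     def norm(el, key):
--         return (el.get(key) or "").lower()
--
--     def comb(el):
--         return norm(el, "text") + " " + norm(el, "label") + " " + norm(el, "id")
--
--     rules = [
--         ("email_input", lambda el: norm(el, "type") == "email" or norm(el, "id") == "i0116"),
--         ("password_input", lambda el: norm(el, "type") == "password" or norm(el, "id") == "i0118"),
--         ("next_btn", lambda el: "next" in comb(el)),
--         ("signin_btn", lambda el: "sign in" in comb(el)),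
--         ("yes_btn", lambda el: "yes" in comb(el)),
--         ("project_name", lambda el: "enter project name" in norm(el, "placeholder")),
--         ("description_input", lambda el: "brief project description" in norm(el, "placeholder")),
--         ("start_date", lambda el: el.get("selector") == '(//input[@type="date"])[1]'),
--         ("end_date", lambda el: el.get("selector") == '(//input[@type="date"])[2]'),
--     ]
--     # last match wins in A's overwrite loop == first match scanning from the end
--     return {key: next((el for el in reversed(dom) if pred(el)), None) for key, pred in rules}
-- ===== Notes on version B (the rewrite author's own statement) =====
-- stated objective: simpler
-- what changed: Replaces A's single pass with a mutable dict and an inline nine-branch if-chain by a data-driven rule table (key, predicate) and, per key, a first-match search over the reversed list (last match wins), built as one dict comprehension.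
import Mathlib
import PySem

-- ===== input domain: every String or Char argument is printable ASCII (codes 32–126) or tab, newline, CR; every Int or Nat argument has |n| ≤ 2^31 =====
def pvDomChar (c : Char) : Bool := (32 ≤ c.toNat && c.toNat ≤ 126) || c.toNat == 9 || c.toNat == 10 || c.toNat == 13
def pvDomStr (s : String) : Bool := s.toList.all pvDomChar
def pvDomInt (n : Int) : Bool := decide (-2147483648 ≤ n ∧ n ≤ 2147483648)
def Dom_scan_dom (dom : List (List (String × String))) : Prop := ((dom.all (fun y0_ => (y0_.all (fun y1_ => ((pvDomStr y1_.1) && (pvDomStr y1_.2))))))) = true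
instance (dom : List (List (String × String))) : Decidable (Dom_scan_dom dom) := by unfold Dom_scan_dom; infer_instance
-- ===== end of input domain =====

-- B replaces A's one-pass dict-overwrite if-chain by a rule table searched from the end (simpler, data-driven); same values proved.

-- ===== PORT A =====
-- el.get(k): dict lookup (first match in the association list), None -> getD ""
def aGet (el : List (String × String)) (k : String) : Option String :=
  (PySem.Dict.mk el).get? k

-- (el.get(k) or "").lower()
def aLow (el : List (String × String)) (k : String) : List Char :=
  PySem.Chars.lower ((aGet el k).getD "").toList

-- the body of A's `for el in dom` loop (A also computes `tag`, which it never uses; omitted)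
def scanStep (res : PySem.Dict String (Option (List (String × String))))
    (el : List (String × String)) : PySem.Dict String (Option (List (String × String))) :=
  let etype := aLow el "type"
  let text := aLow el "text"
  let eid := aLow el "id"
  let label := aLow el "label"
  let placeholder := aLow el "placeholder"
  let comb := text ++ " ".toList ++ label ++ " ".toList ++ eid
  let res := if etype == "email".toList || eid == "i0116".toList then res.insert "email_input" (some el) else res
  let res := if etype == "password".toList || eid == "i0118".toList then res.insert "password_input" (some el) else res
  let res := if PySem.Chars.isIn "next".toList comb then res.insert "next_btn" (some el) else res
  let res := if PySem.Chars.isIn "sign in".toList comb then res.insert "signin_btn" (some el) else res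
  let res := if PySem.Chars.isIn "yes".toList comb then res.insert "yes_btn" (some el) else res
  let res := if PySem.Chars.isIn "enter project name".toList placeholder then res.insert "project_name" (some el) else res
  let res := if PySem.Chars.isIn "brief project description".toList placeholder then res.insert "description_input" (some el) else res
  let res := if aGet el "selector" == some "(//input[@type=\"date\"])[1]" then res.insert "start_date" (some el) else res
  let res := if aGet el "selector" == some "(//input[@type=\"date\"])[2]" then res.insert "end_date" (some el) else res
  res

def scanInit : PySem.Dict String (Option (List (String × String))) :=
  PySem.Dict.mk [("email_input", none), ("password_input", none), ("next_btn", none),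
                 ("signin_btn", none), ("yes_btn", none), ("project_name", none),
                 ("description_input", none), ("start_date", none), ("end_date", none)]

def scan_dom (dom : List (List (String × String))) : List (String × Option (List (String × String))) :=
  (dom.foldl scanStep scanInit).items

-- ===== PORT B =====
-- (el.get(key) or "").lower(), with el.get = first match in the association list
def bNorm (el : List (String × String)) (k : String) : List Char :=
  PySem.Chars.lower ((el.lookup k).getD "").toList

def bComb (el : List (String × String)) : List Char :=
  bNorm el "text" ++ " ".toList ++ bNorm el "label" ++ " ".toList ++ bNorm el "id"

def pEmail (el : List (String × String)) : Bool :=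
  bNorm el "type" == "email".toList || bNorm el "id" == "i0116".toList
def pPassword (el : List (String × String)) : Bool :=
  bNorm el "type" == "password".toList || bNorm el "id" == "i0118".toList
def pNext (el : List (String × String)) : Bool := PySem.Chars.isIn "next".toList (bComb el)
def pSignin (el : List (String × String)) : Bool := PySem.Chars.isIn "sign in".toList (bComb el)
def pYes (el : List (String × String)) : Bool := PySem.Chars.isIn "yes".toList (bComb el)
def pProject (el : List (String × String)) : Bool :=
  PySem.Chars.isIn "enter project name".toList (bNorm el "placeholder")
def pDescription (el : List (String × String)) : Bool :=
  PySem.Chars.isIn "brief project description".toList (bNorm el "placeholder")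
def pStart (el : List (String × String)) : Bool :=
  el.lookup "selector" == some "(//input[@type=\"date\"])[1]"
def pEnd (el : List (String × String)) : Bool :=
  el.lookup "selector" == some "(//input[@type=\"date\"])[2]"

def bRules : List (String × (List (String × String) → Bool)) :=
  [("email_input", pEmail), ("password_input", pPassword), ("next_btn", pNext),
   ("signin_btn", pSignin), ("yes_btn", pYes), ("project_name", pProject),
   ("description_input", pDescription), ("start_date", pStart), ("end_date", pEnd)]

-- {key: next((el for el in reversed(dom) if pred(el)), None) for key, pred in rules}
def scan_dom_alt (dom : List (List (String × String))) : List (String × Option (List (String × String))) :=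
  bRules.map (fun r => (r.1, dom.reverse.find? r.2))

-- ===== PRECONDITION & SPEC =====
def Spec_scan_dom (dom : List (List (String × String))) (out : List (String × Option (List (String × String)))) : Prop := out = scan_dom_alt dom
instance (dom : List (List (String × String))) (out : List (String × Option (List (String × String)))) : Decidable (Spec_scan_dom dom out) := by unfold Spec_scan_dom; infer_instance

-- ===== CLAIM (what is proved, stated in full; the proofs are below) =====
def Claim_equal_scan_dom : Prop := ∀ (dom : List (List (String × String))), Dom_scan_dom dom → Spec_scan_dom dom (scan_dom dom)

-- ===== LEMMAS AND PROOFS =====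

-- A's dict during its loop, as nine explicit slots
def mk9 (v1 v2 v3 v4 v5 v6 v7 v8 v9 : Option (List (String × String))) :
    PySem.Dict String (Option (List (String × String))) :=
  PySem.Dict.mk [("email_input", v1), ("password_input", v2), ("next_btn", v3),
                 ("signin_btn", v4), ("yes_btn", v5), ("project_name", v6),
                 ("description_input", v7), ("start_date", v8), ("end_date", v9)]

lemma aGet_eq (el : List (String × String)) (k : String) : aGet el k = el.lookup k := by
  unfold aGet
  induction el with
  | nil => rfl
  | cons h t ih =>
    by_cases hk : h.1 = k
    · subst hk; simp [PySem.Dict.get?, List.lookup, List.find?] at *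
    · simp [PySem.Dict.get?, List.lookup, List.find?, beq_false_of_ne hk,
            beq_false_of_ne (Ne.symm hk)] at *
      exact ih

lemma aLow_eq (el : List (String × String)) (k : String) : aLow el k = bNorm el k := by
  simp [aLow, bNorm, aGet_eq]

lemma ite1 (c : Bool) (v1 v2 v3 v4 v5 v6 v7 v8 v9 x : Option (List (String × String))) :
    (if c then (mk9 v1 v2 v3 v4 v5 v6 v7 v8 v9).insert "email_input" x else mk9 v1 v2 v3 v4 v5 v6 v7 v8 v9)
    = mk9 (if c then x else v1) v2 v3 v4 v5 v6 v7 v8 v9 := by cases c <;> rfl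
lemma ite2 (c : Bool) (v1 v2 v3 v4 v5 v6 v7 v8 v9 x : Option (List (String × String))) :
    (if c then (mk9 v1 v2 v3 v4 v5 v6 v7 v8 v9).insert "password_input" x else mk9 v1 v2 v3 v4 v5 v6 v7 v8 v9)
    = mk9 v1 (if c then x else v2) v3 v4 v5 v6 v7 v8 v9 := by cases c <;> rfl
lemma ite3 (c : Bool) (v1 v2 v3 v4 v5 v6 v7 v8 v9 x : Option (List (String × String))) :
    (if c then (mk9 v1 v2 v3 v4 v5 v6 v7 v8 v9).insert "next_btn" x else mk9 v1 v2 v3 v4 v5 v6 v7 v8 v9)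
    = mk9 v1 v2 (if c then x else v3) v4 v5 v6 v7 v8 v9 := by cases c <;> rfl
lemma ite4 (c : Bool) (v1 v2 v3 v4 v5 v6 v7 v8 v9 x : Option (List (String × String))) :
    (if c then (mk9 v1 v2 v3 v4 v5 v6 v7 v8 v9).insert "signin_btn" x else mk9 v1 v2 v3 v4 v5 v6 v7 v8 v9)
    = mk9 v1 v2 v3 (if c then x else v4) v5 v6 v7 v8 v9 := by cases c <;> rfl
lemma ite5 (c : Bool) (v1 v2 v3 v4 v5 v6 v7 v8 v9 x : Option (List (String × String))) :
    (if c then (mk9 v1 v2 v3 v4 v5 v6 v7 v8 v9).insert "yes_btn" x else mk9 v1 v2 v3 v4 v5 v6 v7 v8 v9)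
    = mk9 v1 v2 v3 v4 (if c then x else v5) v6 v7 v8 v9 := by cases c <;> rfl
lemma ite6 (c : Bool) (v1 v2 v3 v4 v5 v6 v7 v8 v9 x : Option (List (String × String))) :
    (if c then (mk9 v1 v2 v3 v4 v5 v6 v7 v8 v9).insert "project_name" x else mk9 v1 v2 v3 v4 v5 v6 v7 v8 v9)
    = mk9 v1 v2 v3 v4 v5 (if c then x else v6) v7 v8 v9 := by cases c <;> rfl
lemma ite7 (c : Bool) (v1 v2 v3 v4 v5 v6 v7 v8 v9 x : Option (List (String × String))) :
    (if c then (mk9 v1 v2 v3 v4 v5 v6 v7 v8 v9).insert "description_input" x else mk9 v1 v2 v3 v4 v5 v6 v7 v8 v9)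
    = mk9 v1 v2 v3 v4 v5 v6 (if c then x else v7) v8 v9 := by cases c <;> rfl
lemma ite8 (c : Bool) (v1 v2 v3 v4 v5 v6 v7 v8 v9 x : Option (List (String × String))) :
    (if c then (mk9 v1 v2 v3 v4 v5 v6 v7 v8 v9).insert "start_date" x else mk9 v1 v2 v3 v4 v5 v6 v7 v8 v9)
    = mk9 v1 v2 v3 v4 v5 v6 v7 (if c then x else v8) v9 := by cases c <;> rfl
lemma ite9 (c : Bool) (v1 v2 v3 v4 v5 v6 v7 v8 v9 x : Option (List (String × String))) :
    (if c then (mk9 v1 v2 v3 v4 v5 v6 v7 v8 v9).insert "end_date" x else mk9 v1 v2 v3 v4 v5 v6 v7 v8 v9)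
    = mk9 v1 v2 v3 v4 v5 v6 v7 v8 (if c then x else v9) := by cases c <;> rfl

lemma stepEq (v1 v2 v3 v4 v5 v6 v7 v8 v9 : Option (List (String × String)))
    (el : List (String × String)) :
    scanStep (mk9 v1 v2 v3 v4 v5 v6 v7 v8 v9) el =
    mk9 (if pEmail el then some el else v1) (if pPassword el then some el else v2)
        (if pNext el then some el else v3) (if pSignin el then some el else v4)
        (if pYes el then some el else v5) (if pProject el then some el else v6)
        (if pDescription el then some el else v7) (if pStart el then some el else v8)
        (if pEnd el then some el else v9) := by
  simp only [scanStep, aLow_eq, aGet_eq, pEmail, pPassword, pNext, pSignin, pYes,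
             pProject, pDescription, pStart, pEnd, bComb, ite1, ite2, ite3, ite4,
             ite5, ite6, ite7, ite8, ite9]
  rfl

-- the per-slot overwrite loop of A
def lastm (p : List (String × String) → Bool) (v : Option (List (String × String)))
    (l : List (List (String × String))) : Option (List (String × String)) :=
  l.foldl (fun a e => if p e then some e else a) v

lemma lastm_cons (p : List (String × String) → Bool) (v : Option (List (String × String)))
    (x : List (String × String)) (xs : List (List (String × String))) :
    lastm p v (x :: xs) = lastm p (if p x then some x else v) xs := rfl

lemma fold9 (l : List (List (String × String)))
    (v1 v2 v3 v4 v5 v6 v7 v8 v9 : Option (List (String × String))) :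
    l.foldl scanStep (mk9 v1 v2 v3 v4 v5 v6 v7 v8 v9) =
    mk9 (lastm pEmail v1 l) (lastm pPassword v2 l) (lastm pNext v3 l) (lastm pSignin v4 l)
        (lastm pYes v5 l) (lastm pProject v6 l) (lastm pDescription v7 l) (lastm pStart v8 l)
        (lastm pEnd v9 l) := by
  induction l generalizing v1 v2 v3 v4 v5 v6 v7 v8 v9 with
  | nil => rfl
  | cons x xs ih => rw [List.foldl_cons, stepEq, ih]; simp only [lastm_cons]

lemma lastm_none_eq_find_reverse (p : List (String × String) → Bool)
    (l : List (List (String × String))) : lastm p none l = l.reverse.find? p := by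
  suffices h : ∀ v, lastm p v l = (l.reverse.find? p).or v by simp [h none]
  induction l with
  | nil => intro v; simp [lastm]
  | cons x xs ih =>
    intro v
    rw [lastm_cons, ih]
    simp only [List.reverse_cons, List.find?_append]
    cases xs.reverse.find? p <;> cases hx : p x <;> simp [hx, Option.or]

-- ===== VERDICT (by name: the statement is the Claim_ definition above) =====
theorem scan_dom_spec : Claim_equal_scan_dom := by
  intro dom _
  show scan_dom dom = scan_dom_alt dom
  unfold scan_dom scan_dom_alt
  rw [show scanInit = mk9 none none none none none none none none none from rfl, fold9]
  simp [bRules, mk9, lastm_none_eq_find_reverse]
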